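-- pv_equiv track=rewrite | github.com/JersonAndino/FLASK_ModeloProbabilistico_RecuperacionDeInformacion | tesauros.py | calculo_frecuencia_diagonal
-- ===== SOURCE A (Python) =====
-- def calculo_frecuencia_diagonal(terminos, biblioteca):
--     frecuencia = set()
--     contador = 0
--     resultado = [ ]
--     for lista in biblioteca:
--         for palabra in lista:
--             if palabra in lista:
--                 contador = contador + 1
--             resultado.append(contador)
--     return resultado
-- ===== SOURCE B (Python) =====
-- def calculo_frecuencia_diagonal(terminos, biblioteca):
--     # Each word is trivially a member of its own list, so the counter just
--     # advances by one per word: the result is [1..N] for N = total word count.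
--     total = 0
--     for lista in biblioteca:
--         for _ in lista:
--             total += 1
--     return list(range(1, total + 1))
-- ===== Notes on version B (the rewrite author's own statement) =====
-- stated objective: faster
-- what changed: The always-true membership test means the counter increments once per word, so B just counts the words and returns list(range(1, total+1)) instead of appending a running counter under a redundant 'in lista' scan.
import Mathlib
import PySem

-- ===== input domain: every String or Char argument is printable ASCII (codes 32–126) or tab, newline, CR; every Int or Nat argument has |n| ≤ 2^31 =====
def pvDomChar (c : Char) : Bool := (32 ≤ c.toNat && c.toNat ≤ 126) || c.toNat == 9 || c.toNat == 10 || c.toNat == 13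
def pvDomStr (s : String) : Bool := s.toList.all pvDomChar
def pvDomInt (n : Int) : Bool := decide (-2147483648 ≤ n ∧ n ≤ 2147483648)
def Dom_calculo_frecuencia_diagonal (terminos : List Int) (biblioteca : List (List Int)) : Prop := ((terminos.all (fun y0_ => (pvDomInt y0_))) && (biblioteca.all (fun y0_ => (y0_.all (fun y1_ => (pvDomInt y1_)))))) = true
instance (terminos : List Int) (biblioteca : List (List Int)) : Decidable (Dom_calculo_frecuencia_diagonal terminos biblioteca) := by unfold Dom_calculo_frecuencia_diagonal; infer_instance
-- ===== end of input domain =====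

-- B replaces A's running counter + redundant per-word 'in lista' scan with counting the words
-- and emitting range(1, total+1); measured faster in a timing run (asymptotic: no membership scan).

-- ===== PORT A =====
-- state: (contador, resultado); the inner branch tests membership of palabra in the whole lista
def calculo_frecuencia_diagonal (terminos : List Int) (biblioteca : List (List Int)) : List Int :=
  (biblioteca.foldl (fun st lista =>
    lista.foldl (fun st palabra =>
      let contador := if palabra ∈ lista then st.1 + 1 else st.1
      (contador, st.2 ++ [contador])) st) ((0 : Int), ([] : List Int))).2

-- ===== PORT B =====
def calculo_frecuencia_diagonal_alt (terminos : List Int) (biblioteca : List (List Int)) : List Int :=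
  let total := biblioteca.foldl (fun t lista => lista.foldl (fun t _ => t + 1) t) (0 : Int)
  PySem.List.pyRange 1 (total + 1) 1

-- ===== PRECONDITION & SPEC =====
def Spec_calculo_frecuencia_diagonal (terminos : List Int) (biblioteca : List (List Int)) (out : List Int) : Prop := out = calculo_frecuencia_diagonal_alt terminos biblioteca
instance (terminos : List Int) (biblioteca : List (List Int)) (out : List Int) : Decidable (Spec_calculo_frecuencia_diagonal terminos biblioteca out) := by unfold Spec_calculo_frecuencia_diagonal; infer_instance

-- ===== CLAIM (what is proved, stated in full; the proofs are below) =====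
def Claim_equal_calculo_frecuencia_diagonal : Prop := ∀ (terminos : List Int) (biblioteca : List (List Int)), Dom_calculo_frecuencia_diagonal terminos biblioteca → Spec_calculo_frecuencia_diagonal terminos biblioteca (calculo_frecuencia_diagonal terminos biblioteca)

-- ===== LEMMAS AND PROOFS =====

-- [c+1, c+2, …, c+n]
def pvSeq (c : Int) : Nat → List Int
  | 0 => []
  | n + 1 => (c + 1) :: pvSeq (c + 1) n

theorem pvSeq_pyRange (n : Nat) : ∀ c : Int, PySem.List.pyRange (c + 1) (c + 1 + n) 1 = pvSeq c n := by
  induction n with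
  | zero => intro c; simp [pvSeq, PySem.List.pyRange]
  | succ m ih =>
    intro c
    rw [PySem.List.pyRange_one_cons (by omega : c + 1 < c + 1 + (m + 1 : Nat))]
    have := ih (c + 1)
    simp only [pvSeq, List.cons.injEq, true_and]
    push_cast
    rw [show c + 1 + ((m : Int) + 1) = c + 1 + 1 + (m : Int) by ring]
    simpa using this

-- inner loop of A: every element taken from `sub ⊆ lista` passes the membership test
theorem innerA (lista : List Int) (sub : List Int) (hsub : ∀ x ∈ sub, x ∈ lista) :
    ∀ (c : Int) (res : List Int),
      sub.foldl (fun st palabra =>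
        let contador := if palabra ∈ lista then st.1 + 1 else st.1
        (contador, st.2 ++ [contador])) (c, res)
      = (c + sub.length, res ++ pvSeq c sub.length) := by
  induction sub with
  | nil => intro c res; simp [pvSeq]
  | cons a t ih =>
    intro c res
    have ha : a ∈ lista := hsub a (by simp)
    have ht : ∀ x ∈ t, x ∈ lista := fun x hx => hsub x (by simp [hx])
    simp only [List.foldl_cons, if_pos ha]
    rw [ih ht (c + 1) (res ++ [c + 1])]
    simp only [pvSeq, Prod.mk.injEq, List.append_assoc, List.singleton_append,
      List.length_cons, and_true]
    push_cast
    ring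

-- inner loop of B counts the list
theorem innerB (lista : List Int) : ∀ t : Int,
    lista.foldl (fun t _ => t + 1) t = t + lista.length := by
  induction lista with
  | nil => intro t; simp
  | cons a l ih => intro t; simp [List.foldl_cons, ih]; ring

-- outer loop of A in closed form
theorem outerA (biblioteca : List (List Int)) :
    ∀ (c : Int) (res : List Int),
      (biblioteca.foldl (fun st lista =>
        lista.foldl (fun st palabra =>
          let contador := if palabra ∈ lista then st.1 + 1 else st.1
          (contador, st.2 ++ [contador])) st) (c, res))
      = (biblioteca.foldl (fun t lista => lista.foldl (fun t _ => t + 1) t) c,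
         res ++ pvSeq c (biblioteca.foldl (fun t lista => t + lista.length) 0 : Nat)) := by
  induction biblioteca with
  | nil => intro c res; simp [pvSeq]
  | cons l bs ih =>
    intro c res
    simp only [List.foldl_cons]
    rw [innerA l l (fun x hx => hx) c res, ih]
    rw [innerB]
    refine congrArg _ ?_
    rw [List.append_assoc]
    refine congrArg _ ?_
    -- pvSeq c (len l) ++ pvSeq (c + len l) k = pvSeq c (len l + k)
    have key : ∀ (n : Nat) (c : Int) (k : Nat), pvSeq c n ++ pvSeq (c + n) k = pvSeq c (n + k) := by
      intro n
      induction n with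
      | zero => intro c k; simp [pvSeq]
      | succ m ihm =>
        intro c k
        simp only [pvSeq, List.cons_append]
        rw [show c + ((m : Nat) + 1 : Nat) = (c + 1) + (m : Nat) by push_cast; ring, ihm]
        rw [show m + 1 + k = m + k + 1 by omega]
        rfl
    have hlen : (bs.foldl (fun t lista => t + lista.length) l.length : Nat)
        = l.length + (bs.foldl (fun t lista => t + lista.length) 0 : Nat) := by
      have gen : ∀ (bs : List (List Int)) (a b : Nat),
          bs.foldl (fun t lista => t + lista.length) (a + b)
          = a + bs.foldl (fun t lista => t + lista.length) b := by
        intro bs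
        induction bs with
        | nil => intro a b; simp
        | cons x xs ihx =>
          intro a b
          simp only [List.foldl_cons]
          rw [show a + b + x.length = a + (b + x.length) by omega, ihx]
      simpa using gen bs l.length 0
    simp only [Nat.zero_add]
    rw [hlen, ← key]

theorem lenSum_cast (biblioteca : List (List Int)) :
    ∀ c : Int, biblioteca.foldl (fun t lista => lista.foldl (fun t _ => t + 1) t) c
      = c + (biblioteca.foldl (fun t lista => t + lista.length) 0 : Nat) := by
  induction biblioteca with
  | nil => intro c; simp
  | cons l bs ih =>
    intro c
    simp only [List.foldl_cons]
    rw [innerB, ih]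
    have gen : ∀ (bs : List (List Int)) (a b : Nat),
        bs.foldl (fun t lista => t + lista.length) (a + b)
        = a + bs.foldl (fun t lista => t + lista.length) b := by
      intro bs
      induction bs with
      | nil => intro a b; simp
      | cons x xs ihx =>
        intro a b
        simp only [List.foldl_cons]
        rw [show a + b + x.length = a + (b + x.length) by omega, ihx]
    have hg := gen bs l.length 0
    simp only [Nat.add_zero] at hg
    simp only [Nat.zero_add]
    rw [hg]
    push_cast
    ring

-- ===== VERDICT (by name: the statement is the Claim_ definition above) =====
theorem calculo_frecuencia_diagonal_spec : Claim_equal_calculo_frecuencia_diagonal := by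
  intro terminos biblioteca _
  unfold Spec_calculo_frecuencia_diagonal calculo_frecuencia_diagonal calculo_frecuencia_diagonal_alt
  rw [outerA biblioteca 0 [], lenSum_cast]
  simp only [List.nil_append]
  have h := pvSeq_pyRange (biblioteca.foldl (fun t lista => t + lista.length) 0) 0
  norm_num at h ⊢
  rw [show ((biblioteca.foldl (fun t lista => t + lista.length) 0 : Nat) : Int) + 1
      = 1 + (biblioteca.foldl (fun t lista => t + lista.length) 0 : Nat) by ring]
  exact h.symm
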